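-- pv_equiv track=rewrite | github.com/masum0009/smpp | smpp_test_client_trx.py | dlr_is_final_for_message
-- ===== SOURCE A (Python) =====
-- def dlr_is_final_for_message(dlr_text: str, msg_id: str) -> bool:
--     """
--     Heuristic for classic DLR text like:
--       id:XYZ ... stat:DELIVRD ...
--     We check:
--       - id matches msg_id (exact string after 'id:')
--       - stat is final (DELIVRD/UNDELIV/REJECTD/EXPIRED)
--     """
--     if not dlr_text or not msg_id:
--         return False
--
--     # Extract id:
--     # common forms: "id:abc" or "id: abc"
--     tid = None
--     parts = dlr_text.split()
--     for p in parts: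
--         if p.startswith("id:"):
--             tid = p[3:].strip()
--             break
--     if tid is None:
--         return False
--
--     if tid != msg_id:
--         return False
--
--     # Extract stat:
--     stat = None
--     for p in parts:
--         if p.startswith("stat:"):
--             stat = p[5:].strip().upper()
--             break
--
--     return stat in {"DELIVRD", "UNDELIV", "REJECTD", "EXPIRED"}
-- ===== SOURCE B (Python) =====
-- _FINAL_STATS = {"DELIVRD", "UNDELIV", "REJECTD", "EXPIRED"}
--
--
-- def dlr_is_final_for_message(dlr_text: str, msg_id: str) -> bool:
--     if not dlr_text or not msg_id:
--         return False
--     fields = {}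
--     for p in dlr_text.split():
--         key, sep, val = p.partition(":")
--         if sep and key not in fields:
--             fields[key] = val
--     tid = fields.get("id")
--     if tid is None or tid.strip() != msg_id:
--         return False
--     return fields.get("stat", "").strip().upper() in _FINAL_STATS
-- ===== Notes on version B (the rewrite author's own statement) =====
-- stated objective: idiomatic
-- what changed: Replaces A's two separate break-on-first-hit scans over the token list (one per prefix) by a single pass that builds a first-occurrence key/value dict via str.partition, after which id and stat are plain dict lookups.
import Mathlib
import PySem

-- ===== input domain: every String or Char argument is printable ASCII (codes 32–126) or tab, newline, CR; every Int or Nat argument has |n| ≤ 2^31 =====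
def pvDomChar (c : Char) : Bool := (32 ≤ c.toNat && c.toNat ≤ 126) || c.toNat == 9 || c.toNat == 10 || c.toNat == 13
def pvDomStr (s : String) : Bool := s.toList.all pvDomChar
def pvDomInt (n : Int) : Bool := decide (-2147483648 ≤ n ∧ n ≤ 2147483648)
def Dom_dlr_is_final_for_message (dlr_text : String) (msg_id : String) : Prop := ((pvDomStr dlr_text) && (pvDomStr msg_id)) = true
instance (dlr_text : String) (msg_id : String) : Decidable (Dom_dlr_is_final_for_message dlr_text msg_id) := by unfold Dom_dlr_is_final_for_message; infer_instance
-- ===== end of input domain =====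

-- B replaces A's two break-on-first-hit prefix scans over the tokens by one pass building a
-- first-occurrence key/value dict (via str.partition) followed by plain lookups (idiomatic; same cost).

-- ===== PORT A =====
def pvFinalStats : PySem.Set String := PySem.Set.ofList ["DELIVRD", "UNDELIV", "REJECTD", "EXPIRED"]

-- A's first loop: first token starting with "id:", value token[3:].strip(); break on hit
def pvFindId : List String → Option String
  | [] => none
  | p :: rest =>
    if PySem.Str.startswith p "id:" then
      some (PySem.Str.strip (PySem.Str.slice p (some 3) none))
    else pvFindId rest

-- A's second loop: first token starting with "stat:", value token[5:].strip().upper(); break on hit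
def pvFindStat : List String → Option String
  | [] => none
  | p :: rest =>
    if PySem.Str.startswith p "stat:" then
      some (PySem.Str.upper (PySem.Str.strip (PySem.Str.slice p (some 5) none)))
    else pvFindStat rest

def dlr_is_final_for_message (dlr_text : String) (msg_id : String) : Bool :=
  if dlr_text = "" || msg_id = "" then false
  else
    let parts := PySem.Str.split₀ dlr_text
    match pvFindId parts with
    | none => false
    | some tid =>
      if tid ≠ msg_id then false
      else
        match pvFindStat parts with
        | some stat => pvFinalStats.contains stat
        | none => false   -- Python: None ∈ {four strings} is False

-- ===== PORT B =====
-- one fold step = B's loop body; p.partition(":") is ported by hand (exact): the chars before the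
-- first ':' are the key, the separator is nonempty iff some ':' occurs, the value is the rest
def pvStep (d : PySem.Dict String String) (p : String) : PySem.Dict String String :=
  let cs := p.toList
  let key := cs.takeWhile (· != ':')
  if key.length < cs.length ∧ d.contains (String.ofList key) = false then
    d.insert (String.ofList key) (String.ofList (cs.drop (key.length + 1)))
  else d

def dlr_is_final_for_message_alt (dlr_text : String) (msg_id : String) : Bool :=
  if dlr_text = "" || msg_id = "" then false
  else
    let fields := (PySem.Str.split₀ dlr_text).foldl pvStep PySem.Dict.empty
    match fields.get? "id" with
    | none => false
    | some tid =>
      if PySem.Str.strip tid ≠ msg_id then false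
      else pvFinalStats.contains (PySem.Str.upper (PySem.Str.strip (fields.getD "stat" "")))

-- ===== PRECONDITION & SPEC =====
def Spec_dlr_is_final_for_message (dlr_text : String) (msg_id : String) (out : Bool) : Prop := out = dlr_is_final_for_message_alt dlr_text msg_id
instance (dlr_text : String) (msg_id : String) (out : Bool) : Decidable (Spec_dlr_is_final_for_message dlr_text msg_id out) := by unfold Spec_dlr_is_final_for_message; infer_instance

-- ===== CLAIM (what is proved, stated in full; the proofs are below) =====
def Claim_equal_dlr_is_final_for_message : Prop := ∀ (dlr_text : String) (msg_id : String), Dom_dlr_is_final_for_message dlr_text msg_id → Spec_dlr_is_final_for_message dlr_text msg_id (dlr_is_final_for_message dlr_text msg_id)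

-- ===== LEMMAS AND PROOFS =====

-- first token whose partition key is k, together with its partition value
def pvM (k : List Char) (p : String) : Option String :=
  if p.toList.takeWhile (· != ':') = k ∧ k.length < p.toList.length then
    some (String.ofList (p.toList.drop (k.length + 1)))
  else none

-- a token starts with k ++ ":" (k colon-free) iff its partition key is k and a colon occurs
theorem pvKey_char : ∀ (k : List Char), ':' ∉ k → ∀ cs : List Char,
    (k ++ [':'] <+: cs) ↔ (cs.takeWhile (· != ':') = k ∧ k.length < cs.length)
  | [], _, cs => by
    cases cs with
    | nil => simp
    | cons c t =>
      by_cases hc : c = ':'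
      · subst hc; simp [List.cons_prefix_cons]
      · simp [List.cons_prefix_cons, hc, Ne.symm hc]
  | a :: k', hk, cs => by
    have ha : a ≠ ':' := fun h => hk (by simp [h])
    have hk' : ':' ∉ k' := fun h => hk (List.mem_cons_of_mem _ h)
    cases cs with
    | nil => simp
    | cons c t =>
      by_cases hc : c = a
      · subst hc
        simp [List.cons_prefix_cons, ha, pvKey_char k' hk' t]
      · by_cases hcc : c = ':'
        · subst hcc
          simp [List.cons_prefix_cons, Ne.symm hc]
        · simp [List.cons_prefix_cons, hc, hcc, Ne.symm hc]

theorem pvSlice_drop (p : String) (n : Nat) :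
    PySem.Str.slice p (some (n : Int)) none = String.ofList (p.toList.drop n) := by
  apply String.toList_inj.mp
  simp [PySem.List.slice_from_natCast]

theorem pvTokId (p : String) :
    (if PySem.Str.startswith p "id:" then
        some (PySem.Str.strip (PySem.Str.slice p (some 3) none)) else none)
      = (pvM ['i','d'] p).map PySem.Str.strip := by
  have hsw : (PySem.Str.startswith p "id:" = true) ↔ ['i','d'] ++ [':'] <+: p.toList := by
    rw [show PySem.Str.startswith p "id:" = PySem.Chars.startswith p.toList ['i','d',':'] from by
      simp [PySem.Str.startswith_eq]]
    exact PySem.Chars.startswith_iff _ _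
  unfold pvM
  by_cases h : ['i','d'] ++ [':'] <+: p.toList
  · rw [if_pos (hsw.mpr h), if_pos (by simpa using (pvKey_char ['i','d'] (by decide) _).mp h)]
    rw [show (3:Int) = ((3:Nat):Int) from by norm_num, pvSlice_drop]
    simp
  · rw [if_neg (fun hb => h (hsw.mp hb)),
      if_neg (fun hb => h ((pvKey_char ['i','d'] (by decide) _).mpr (by simpa using hb)))]
    simp

theorem pvTokStat (p : String) :
    (if PySem.Str.startswith p "stat:" then
        some (PySem.Str.upper (PySem.Str.strip (PySem.Str.slice p (some 5) none))) else none)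
      = (pvM ['s','t','a','t'] p).map (fun v => PySem.Str.upper (PySem.Str.strip v)) := by
  have hsw : (PySem.Str.startswith p "stat:" = true) ↔ ['s','t','a','t'] ++ [':'] <+: p.toList := by
    rw [show PySem.Str.startswith p "stat:" = PySem.Chars.startswith p.toList ['s','t','a','t',':'] from by
      simp [PySem.Str.startswith_eq]]
    exact PySem.Chars.startswith_iff _ _
  unfold pvM
  by_cases h : ['s','t','a','t'] ++ [':'] <+: p.toList
  · rw [if_pos (hsw.mpr h), if_pos (by simpa using (pvKey_char ['s','t','a','t'] (by decide) _).mp h)]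
    rw [show (5:Int) = ((5:Nat):Int) from by norm_num, pvSlice_drop]
    simp
  · rw [if_neg (fun hb => h (hsw.mp hb)),
      if_neg (fun hb => h ((pvKey_char ['s','t','a','t'] (by decide) _).mpr (by simpa using hb)))]
    simp

theorem pvFindId_eq (parts : List String) :
    pvFindId parts = (parts.findSome? (pvM ['i','d'])).map PySem.Str.strip := by
  induction parts with
  | nil => simp [pvFindId]
  | cons p rest ih =>
    rw [pvFindId]
    simp only [List.findSome?_cons]
    have h := pvTokId p
    cases hM : pvM ['i','d'] p with
    | none =>
      rw [hM] at h
      simp only [Option.map_none] at h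
      by_cases hb : PySem.Str.startswith p "id:" = true
      · rw [if_pos hb] at h; exact absurd h (by simp)
      · rw [if_neg hb, ih]
    | some v =>
      rw [hM] at h
      simp only [Option.map_some] at h
      by_cases hb : PySem.Str.startswith p "id:" = true
      · rw [if_pos hb] at h; rw [if_pos hb, h]; rfl
      · rw [if_neg hb] at h; exact absurd h (by simp)

theorem pvFindStat_eq (parts : List String) :
    pvFindStat parts = (parts.findSome? (pvM ['s','t','a','t'])).map
      (fun v => PySem.Str.upper (PySem.Str.strip v)) := by
  induction parts with
  | nil => simp [pvFindStat]
  | cons p rest ih =>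
    rw [pvFindStat]
    simp only [List.findSome?_cons]
    have h := pvTokStat p
    cases hM : pvM ['s','t','a','t'] p with
    | none =>
      rw [hM] at h
      simp only [Option.map_none] at h
      by_cases hb : PySem.Str.startswith p "stat:" = true
      · rw [if_pos hb] at h; exact absurd h (by simp)
      · rw [if_neg hb, ih]
    | some v =>
      rw [hM] at h
      simp only [Option.map_some] at h
      by_cases hb : PySem.Str.startswith p "stat:" = true
      · rw [if_pos hb] at h; rw [if_pos hb, h]; rfl
      · rw [if_neg hb] at h; exact absurd h (by simp)

-- the dict built by B's single pass answers get? k with the first token whose key is k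
theorem pvFold_get? (parts : List String) (d : PySem.Dict String String) (k : List Char) :
    (parts.foldl pvStep d).get? (String.ofList k) =
      (d.get? (String.ofList k)).or (parts.findSome? (pvM k)) := by
  induction parts generalizing d with
  | nil => simp
  | cons p rest ih =>
    rw [List.foldl_cons, ih]
    simp only [List.findSome?_cons, pvStep, pvM]
    by_cases hkey : p.toList.takeWhile (· != ':') = k
    · rw [hkey]
      by_cases hlen : k.length < p.toList.length
      · by_cases hc : d.contains (String.ofList k) = true
        · rw [if_neg (by rintro ⟨_, h2⟩; simp [hc] at h2), if_pos ⟨rfl, hlen⟩]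
          obtain ⟨w, hw⟩ := Option.isSome_iff_exists.mp
            ((PySem.Dict.contains_eq_isSome_get? d _) ▸ hc)
          rw [hw, Option.some_or, Option.some_or]
        · have hcf : d.contains (String.ofList k) = false := by
            simpa [Bool.not_eq_true] using hc
          rw [if_pos ⟨hlen, hcf⟩, if_pos ⟨rfl, hlen⟩,
            PySem.Dict.get?_insert_self, (PySem.Dict.get?_eq_none_iff_contains d _).mpr hcf,
            Option.some_or, Option.none_or]
      · rw [if_neg (by rintro ⟨h1, _⟩; exact hlen h1), if_neg (by rintro ⟨_, h2⟩; exact hlen h2)]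
    · have hne : String.ofList k ≠ String.ofList (p.toList.takeWhile (· != ':')) := by
        intro h
        have h2 : k = p.toList.takeWhile (· != ':') := by
          have h3 := congrArg String.toList h
          simpa using h3
        exact hkey h2.symm
      have hM : (if List.takeWhile (fun x => x != ':') p.toList = k ∧ k.length < p.toList.length then
          some (String.ofList (List.drop (k.length + 1) p.toList)) else none) = none := by
        apply if_neg
        rintro ⟨h1, _⟩
        exact hkey h1
      rw [hM]
      split
      · rw [PySem.Dict.get?_insert_of_ne _ _ hne]
      · rfl

theorem pvMain (dlr_text msg_id : String) :
    dlr_is_final_for_message dlr_text msg_id = dlr_is_final_for_message_alt dlr_text msg_id := by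
  simp only [dlr_is_final_for_message, dlr_is_final_for_message_alt]
  split
  · rfl
  · rw [pvFindId_eq, pvFindStat_eq,
      show ("id" : String) = String.ofList ['i','d'] from by decide,
      show ("stat" : String) = String.ofList ['s','t','a','t'] from by decide,
      pvFold_get? _ PySem.Dict.empty ['i','d'],
      show ((PySem.Str.split₀ dlr_text).foldl pvStep PySem.Dict.empty).getD (String.ofList ['s','t','a','t']) "" =
        (((PySem.Str.split₀ dlr_text).foldl pvStep PySem.Dict.empty).get? (String.ofList ['s','t','a','t'])).getD "" from rfl,
      pvFold_get? _ PySem.Dict.empty ['s','t','a','t'],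
      PySem.Dict.get?_empty, PySem.Dict.get?_empty, Option.none_or, Option.none_or]
    cases (PySem.Str.split₀ dlr_text).findSome? (pvM ['i','d']) with
    | none => rfl
    | some tid =>
      simp only [Option.map_some]
      split
      · rfl
      · cases (PySem.Str.split₀ dlr_text).findSome? (pvM ['s','t','a','t']) with
        | none => rfl
        | some v => rfl

-- ===== VERDICT (by name: the statement is the Claim_ definition above) =====
theorem dlr_is_final_for_message_spec : Claim_equal_dlr_is_final_for_message := by
  intro t m _
  exact pvMain t m
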